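-- pv_equiv track=rewrite | github.com/IlyaNSV/Python_algorithms | Les3_task5_variations.py | function_method
-- ===== SOURCE A (Python) =====
-- def function_method(massive):
--     minus_massive = []
--     massive.sort()
--     for i in massive:
--         if i < 0: minus_massive.append(i)
--         else: break
--
--     answer = max(minus_massive)
--     return f'Ответ:{answer}'
-- ===== SOURCE B (Python) =====
-- def function_method(massive):
--     # Largest negative = max over the negative elements; no sorting needed.
--     return f'Ответ:{max(i for i in massive if i < 0)}'
-- ===== Notes on version B (the rewrite author's own statement) =====
-- stated objective: simpler
-- what changed: Drops the sort entirely: instead of sorting and scanning the negative prefix, B takes the max over a single filtered pass of the unsorted list (the largest negative is just the maximum of the negative elements); B does not mutate the argument, A sorts it in place.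
import Mathlib
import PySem

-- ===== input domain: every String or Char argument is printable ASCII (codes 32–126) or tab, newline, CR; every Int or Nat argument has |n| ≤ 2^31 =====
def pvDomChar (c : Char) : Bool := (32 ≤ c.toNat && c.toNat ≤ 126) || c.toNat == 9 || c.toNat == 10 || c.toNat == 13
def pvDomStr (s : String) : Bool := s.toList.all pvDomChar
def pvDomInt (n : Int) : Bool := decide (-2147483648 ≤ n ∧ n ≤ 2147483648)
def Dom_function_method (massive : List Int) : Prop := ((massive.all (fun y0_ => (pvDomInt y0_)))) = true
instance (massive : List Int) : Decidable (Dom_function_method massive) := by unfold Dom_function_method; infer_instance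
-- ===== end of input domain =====

-- B drops the sort and takes the max over one filtered pass of the unsorted list (simpler);
-- equivalence is about the return value only (A sorts the argument in place, B does not mutate it).

-- ===== PORT A =====
-- the 'for i in massive: if i < 0: append else: break' loop, step for step
def pvLoopA : List Int → List Int → List Int
  | [], acc => acc
  | i :: t, acc => if i < 0 then pvLoopA t (acc ++ [i]) else acc

def function_method (massive : List Int) : String :=
  let s := PySem.List.sorted massive (fun x => x)
  let minus_massive := pvLoopA s []
  match PySem.List.max? minus_massive (fun x => x) with
  | some answer => "Ответ:" ++ PySem.Int.toStr answer
  | none => ""  -- unreachable inside Pre_: max([]) raises ValueError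

-- ===== PORT B =====
def function_method_alt (massive : List Int) : String :=
  match PySem.List.max? (massive.filter (fun i => decide (i < 0))) (fun x => x) with
  | some answer => "Ответ:" ++ PySem.Int.toStr answer
  | none => ""  -- unreachable inside Pre_: max of an empty generator raises ValueError

-- ===== PRECONDITION & SPEC =====
-- Pre_ excludes exactly the inputs with no negative element, on which both Pythons raise ValueError (max of an empty sequence).
def Pre_function_method (massive : List Int) : Prop := ∃ x ∈ massive, x < 0
instance (massive : List Int) : Decidable (Pre_function_method massive) := by unfold Pre_function_method; infer_instance

def pvWitness_function_method : List Int := [-3, 1]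

def Spec_function_method (massive : List Int) (out : String) : Prop := out = function_method_alt massive
instance (massive : List Int) (out : String) : Decidable (Spec_function_method massive out) := by unfold Spec_function_method; infer_instance

-- ===== CLAIM =====
def Claim_equal_function_method : Prop := ∀ (massive : List Int), Dom_function_method massive → Pre_function_method massive → Spec_function_method massive (function_method massive)

-- ===== LEMMAS AND PROOFS =====

-- A's loop is acc ++ takeWhile (< 0)
theorem pvLoopA_eq_takeWhile (xs acc : List Int) :
    pvLoopA xs acc = acc ++ xs.takeWhile (fun i => decide (i < 0)) := by
  induction xs generalizing acc with
  | nil => simp [pvLoopA]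
  | cons x t ih =>
    by_cases h : x < 0
    · simp [pvLoopA, h, ih]
    · simp [pvLoopA, h]

-- on an ascending list, the negatives form a prefix: takeWhile (< 0) = filter (< 0)
theorem takeWhile_neg_eq_filter (xs : List Int) (hpw : xs.Pairwise (fun a b => a ≤ b)) :
    xs.takeWhile (fun i => decide (i < 0)) = xs.filter (fun i => decide (i < 0)) := by
  induction xs with
  | nil => rfl
  | cons x t ih =>
    rcases List.pairwise_cons.mp hpw with ⟨hx, ht⟩
    by_cases h : x < 0
    · simp [h, ih ht]
    · have : t.filter (fun i => decide (i < 0)) = [] := by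
        rw [List.filter_eq_nil_iff]
        intro y hy
        have := hx y hy
        simp; omega
      simp [h, this]

-- max (no key) of a list is invariant under permutation
theorem max?_id_perm (xs ys : List Int) (h : xs.Perm ys) :
    PySem.List.max? xs (fun x => x) = PySem.List.max? ys (fun x => x) := by
  cases hxs : PySem.List.max? xs (fun x => x) with
  | none =>
    have hx : xs = [] := by rwa [PySem.List.max?_eq_none_iff] at hxs
    subst hx
    have hy : ys = [] := h.nil_eq.symm
    subst hy
    rfl
  | some m =>
    cases hys : PySem.List.max? ys (fun x => x) with
    | none =>
      have hy : ys = [] := by rwa [PySem.List.max?_eq_none_iff] at hys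
      subst hy
      have hx : xs = [] := h.eq_nil
      subst hx
      rw [hys] at hxs
      cases hxs
    | some m' =>
      have hm : m ∈ xs := PySem.List.max?_mem hxs
      have hm' : m' ∈ ys := PySem.List.max?_mem hys
      have h1 : m ≤ m' := PySem.List.max?_isMax hys m (h.mem_iff.mp hm)
      have h2 : m' ≤ m := PySem.List.max?_isMax hxs m' (h.symm.mem_iff.mp hm')
      have : m = m' := le_antisymm h1 h2
      simp [this]

theorem pvMax_eq (massive : List Int) :
    PySem.List.max? (pvLoopA (PySem.List.sorted massive (fun x => x)) []) (fun x => x) =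
      PySem.List.max? (massive.filter (fun i => decide (i < 0))) (fun x => x) := by
  set s := PySem.List.sorted massive (fun x => x) with hs
  have hpw : s.Pairwise (fun a b => a ≤ b) := by
    simpa using PySem.List.sorted_pairwise massive (fun x => x)
  rw [pvLoopA_eq_takeWhile, List.nil_append, takeWhile_neg_eq_filter s hpw]
  exact max?_id_perm _ _ ((PySem.List.sorted_perm massive (fun x => x) false).filter _)

-- ===== VERDICT =====
theorem function_method_spec : Claim_equal_function_method := by
  intro massive _ _
  unfold Spec_function_method function_method function_method_alt
  dsimp only
  rw [pvMax_eq]
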